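-- pv_equiv track=rewrite | github.com/glennyonemitsu/MarkupHiveServer | src/service/util.py | valid_subdomain
-- ===== SOURCE A (Python) =====
-- def valid_subdomain(subdomain):
--     start = subdomain[0]
--     end = subdomain[-1]
--     if start == '-' or end == '-' or '--' in subdomain:
--         return False
--     parts = subdomain.split('-')
--     for part in parts:
--         if not part.isalnum():
--             return False
--     return True
-- ===== SOURCE B (Python) =====
-- def valid_subdomain(subdomain):
--     if subdomain[0] == '-' or subdomain[-1] == '-':
--         return False
--     prev = ''
--     for c in subdomain:
--         if c == '-':
--             if prev == '-':
--                 return False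
--         elif not c.isalnum():
--             return False
--         prev = c
--     return True
-- ===== Notes on version B (the rewrite author's own statement) =====
-- stated objective: alternative
-- what changed: B replaces A's substring search for a double hyphen plus the split-on-hyphen-then-check-each-part pass by a single left-to-right character scan that remembers the previous character, rejecting consecutive hyphens and non-alphanumeric non-hyphen characters; the empty-string IndexError is excluded by Pre_.
import Mathlib
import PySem

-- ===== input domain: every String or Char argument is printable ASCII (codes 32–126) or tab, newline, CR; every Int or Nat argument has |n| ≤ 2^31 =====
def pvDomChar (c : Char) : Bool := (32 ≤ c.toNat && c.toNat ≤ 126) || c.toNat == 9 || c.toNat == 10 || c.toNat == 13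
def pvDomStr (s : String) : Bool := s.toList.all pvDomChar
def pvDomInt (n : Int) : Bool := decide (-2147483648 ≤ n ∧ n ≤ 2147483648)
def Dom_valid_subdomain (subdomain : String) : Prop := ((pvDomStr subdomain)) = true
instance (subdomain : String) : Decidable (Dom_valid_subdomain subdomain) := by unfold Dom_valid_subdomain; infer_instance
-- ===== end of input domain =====

-- B replaces A's split('-')-and-check-parts pass by a single character scan that
-- remembers the previous character (objective: alternative decomposition, same cost).

-- ===== PORT A =====
-- subdomain[0] / subdomain[-1] raise IndexError on "" (the `none` branch, excluded by Pre_);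
-- then the hyphen guards, then split('-') with every part checked by isalnum().
def valid_subdomain (subdomain : String) : Bool :=
  match PySem.Str.pyGet? subdomain 0, PySem.Str.pyGet? subdomain (-1) with
  | some start, some last =>
      if start == '-' || last == '-' || PySem.Str.isIn "--" subdomain then
        false
      else
        match PySem.Str.split? subdomain "-" with
        | some parts => parts.all (fun part => PySem.Str.strIsalnum part)
        | none => false
  | _, _ => false

-- ===== PORT B =====
-- the `for c in subdomain` loop of Source B; `prev` starts as '' (here: none)
def pvScanB : List Char → Option Char → Bool
  | [], _ => true
  | c :: rest, prev =>
      if c == '-' then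
        if prev == some '-' then false else pvScanB rest (some c)
      else if !(PySem.Chars.isalnum c) then false
      else pvScanB rest (some c)

def valid_subdomain_alt (subdomain : String) : Bool :=
  match PySem.Str.pyGet? subdomain 0 with
  | none => false
  | some s0 =>
      match PySem.Str.pyGet? subdomain (-1) with
      | none => false
      | some s1 =>
          if s0 == '-' || s1 == '-' then false
          else pvScanB subdomain.toList none

-- ===== PRECONDITION & SPEC =====
-- Pre_ excludes only the empty string, where A (and B) raise IndexError on subdomain[0].
def Pre_valid_subdomain (subdomain : String) : Prop := subdomain ≠ ""
instance (subdomain : String) : Decidable (Pre_valid_subdomain subdomain) := by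
  unfold Pre_valid_subdomain; infer_instance

def pvWitness_valid_subdomain : String := "ab-c9"

def Spec_valid_subdomain (subdomain : String) (out : Bool) : Prop :=
  out = valid_subdomain_alt subdomain
instance (subdomain : String) (out : Bool) : Decidable (Spec_valid_subdomain subdomain out) := by
  unfold Spec_valid_subdomain; infer_instance

-- ===== CLAIM (what is proved, stated in full; the proofs are below) =====
def Claim_equal_valid_subdomain : Prop :=
  ∀ (subdomain : String), Dom_valid_subdomain subdomain →
    Pre_valid_subdomain subdomain →
    Spec_valid_subdomain subdomain (valid_subdomain subdomain)

-- ===== LEMMAS AND PROOFS =====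

-- "no two consecutive hyphens"
def pvChainOK : List Char → Bool
  | [] => true
  | c :: rest => !(c == '-' && rest.head? == some '-') && pvChainOK rest

-- "every non-hyphen character is alphanumeric"
def pvAllOK (l : List Char) : Bool := l.all (fun c => c == '-' || PySem.Chars.isalnum c)

-- "the last character is a hyphen"
def pvLastDash : List Char → Bool
  | [] => false
  | c :: rest => if rest.isEmpty then c == '-' else pvLastDash rest

-- A's split loop, fused: `cur` is the reversed current part
def pvPartsOK : List Char → List Char → Bool
  | [], cur => PySem.Chars.strIsalnum cur.reverse
  | c :: rest, cur =>
      if c == '-' then PySem.Chars.strIsalnum cur.reverse && pvPartsOK rest []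
      else pvPartsOK rest (c :: cur)

theorem pvScanB_eq (l : List Char) :
    ∀ prev : Option Char,
      pvScanB l prev
        = (!(prev == some '-' && l.head? == some '-') && (pvChainOK l && pvAllOK l)) := by
  induction l with
  | nil => intro prev; simp [pvScanB, pvChainOK, pvAllOK]
  | cons c rest ih =>
    intro prev
    simp only [pvScanB, ih, pvChainOK, pvAllOK, List.head?_cons, List.all_cons]
    cases hp : (prev == some '-') <;> cases hcd : (c == '-') <;>
      cases ha : PySem.Chars.isalnum c <;>
        simp_all [Bool.beq_eq_decide_eq, Bool.and_assoc, Bool.and_comm, Bool.and_left_comm]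

theorem pvLastDash_eq (l : List Char) : pvLastDash l = (l.getLast? == some '-') := by
  induction l with
  | nil => simp [pvLastDash]
  | cons c rest ih =>
    cases rest with
    | nil => simp [pvLastDash]
    | cons d t => simpa [pvLastDash, List.getLast?_cons_cons] using ih

theorem pvGoAll (fuel : Nat) :
    ∀ (l cur : List Char) (acc : List (List Char)), l.length ≤ fuel →
      (PySem.Chars.splitOn.go ['-'] fuel l cur acc).all PySem.Chars.strIsalnum
        = (acc.all PySem.Chars.strIsalnum && pvPartsOK l cur) := by
  induction fuel with
  | zero =>
    intro l cur acc h
    have : l = [] := List.length_eq_zero_iff.mp (Nat.le_zero.mp h)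
    subst this
    simp [PySem.Chars.splitOn.go, pvPartsOK, Bool.and_comm]
  | succ fuel ih =>
    intro l cur acc h
    cases l with
    | nil => simp [PySem.Chars.splitOn.go, pvPartsOK, Bool.and_comm]
    | cons c rest =>
      by_cases hc : c = '-'
      · subst hc
        have hpre : List.isPrefixOf ['-'] ('-' :: rest) = true := by
          simp [List.isPrefixOf]
        simp only [PySem.Chars.splitOn.go, hpre, if_pos]
        rw [ih _ _ _ (by simpa using Nat.le_of_succ_le_succ (by simpa using h))]
        simp [pvPartsOK, Bool.and_comm, Bool.and_left_comm]
      · have hpre : List.isPrefixOf ['-'] (c :: rest) = false := by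
          simp [List.isPrefixOf]
          intro h'; exact hc h'.symm
        simp only [PySem.Chars.splitOn.go, hpre, Bool.false_eq_true, if_neg, not_false_iff]
        rw [ih _ _ _ (by simpa using Nat.le_of_succ_le_succ (by simpa using h))]
        simp [pvPartsOK, hc]

theorem pvIsEmpty_append_singleton (xs : List Char) (x : Char) :
    (xs ++ [x]).isEmpty = false := by simp

theorem pvPartsOK_eq (l : List Char) :
    ∀ cur : List Char,
      pvPartsOK l cur
        = (cur.all PySem.Chars.isalnum && pvAllOK l && pvChainOK l
            && !(cur.isEmpty && l.head? == some '-')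
            && !(cur.isEmpty && l.isEmpty)
            && !(pvLastDash l)) := by
  induction l with
  | nil =>
    intro cur
    simp only [pvPartsOK, PySem.Chars.strIsalnum, pvAllOK, pvChainOK, pvLastDash,
      List.all_nil, List.all_reverse, List.head?_nil, List.isEmpty_nil]
    cases hce : cur.isEmpty <;> cases hca : cur.all PySem.Chars.isalnum <;>
      simp_all [List.isEmpty_iff]
  | cons c rest ih =>
    intro cur
    simp only [pvPartsOK, ih, PySem.Chars.strIsalnum, pvAllOK, pvChainOK, pvLastDash,
      List.all_cons, List.all_reverse, List.head?_cons, List.isEmpty_cons]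
    cases rest with
    | nil =>
      simp only [List.all_nil, List.head?_nil, List.isEmpty_nil, pvChainOK, pvLastDash]
      cases cur <;> cases hcd : (c == '-') <;> cases ha : PySem.Chars.isalnum c <;>
          simp_all [Bool.beq_eq_decide_eq]
    | cons d t =>
      simp only [List.head?_cons, List.isEmpty_cons, pvChainOK, pvLastDash]
      cases cur <;> cases hcd : (c == '-') <;> cases hdd : (d == '-') <;>
        cases ha : PySem.Chars.isalnum c <;>
          simp_all [Bool.beq_eq_decide_eq, List.isEmpty_iff, pvIsEmpty_append_singleton, Bool.and_assoc, Bool.and_comm, Bool.and_left_comm]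

theorem pvChainOK_append_dashes (s t : List Char) :
    pvChainOK (s ++ '-' :: '-' :: t) = false := by
  induction s with
  | nil => simp [pvChainOK]
  | cons a s ih => simp [pvChainOK, ih]

theorem pvChainOK_false_iff (l : List Char) :
    pvChainOK l = false ↔ ['-', '-'] <:+: l := by
  constructor
  · intro h
    induction l with
    | nil => simp [pvChainOK] at h
    | cons c rest ih =>
      rw [pvChainOK, Bool.and_eq_false_iff] at h
      rcases h with h | h
      · simp only [Bool.not_eq_false', Bool.and_eq_true, beq_iff_eq] at h
        obtain ⟨hc, hh⟩ := h
        cases rest with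
        | nil => simp at hh
        | cons d t =>
          simp at hh
          subst hc; subst hh
          exact ⟨[], t, rfl⟩
      · exact List.infix_cons (ih h)
  · rintro ⟨s, t, hst⟩
    have hl : l = s ++ '-' :: '-' :: t := by simpa using hst.symm
    rw [hl]
    exact pvChainOK_append_dashes s t

theorem valid_subdomain_spec : Claim_equal_valid_subdomain := by
  intro s _ hpre
  unfold Spec_valid_subdomain valid_subdomain valid_subdomain_alt
  have hne : s.toList ≠ [] := by simpa using hpre
  simp only [PySem.Str.pyGet?_eq, PySem.Chars.pyGet?]
  rw [PySem.List.pyGet?_zero, PySem.List.pyGet?_neg_one]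
  obtain ⟨c, rest, hcs⟩ := List.exists_cons_of_ne_nil hne
  cases hlast : s.toList.getLast? with
  | none => exact absurd (List.getLast?_eq_none_iff.mp hlast) hne
  | some e =>
    rw [hcs] at hlast
    rw [hcs]
    simp only [List.getElem?_cons_zero]
    cases hc0 : (c == '-') with
    | true => simp
    | false =>
      cases he0 : (e == '-') with
      | true => simp
      | false =>
        have hc : c ≠ '-' := by simpa using hc0
        have he : e ≠ '-' := by simpa using he0
        have hB : pvScanB (c :: rest) none = (pvChainOK (c :: rest) && pvAllOK (c :: rest)) := by
          rw [pvScanB_eq]; simp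
        have hisin : PySem.Str.isIn "--" s = !pvChainOK (c :: rest) := by
          rw [PySem.Str.isIn_eq, hcs]
          have h2 : ("--".toList : List Char) = ['-', '-'] := rfl
          rw [h2]
          cases hch : pvChainOK (c :: rest) with
          | false =>
            simp only [Bool.not_false]
            exact (PySem.Chars.isIn_iff_infix _ _).mpr ((pvChainOK_false_iff _).mp hch)
          | true =>
            simp only [Bool.not_true]
            exact (PySem.Chars.isIn_eq_false_iff _ _).mpr
              (fun hinf => by
                have h3 := (pvChainOK_false_iff (c :: rest)).mpr hinf
                rw [hch] at h3; exact absurd h3 (by simp))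
        rw [hisin, hB]
        simp only [Bool.false_or]
        cases hch : pvChainOK (c :: rest) with
        | false => simp
        | true =>
          simp only [Bool.not_true, Bool.false_eq_true, if_false, Bool.true_and]
          have hsplit : PySem.Chars.split? s.toList "-".toList
              = some (PySem.Chars.splitOn (c :: rest) ['-']) := by
            rw [hcs]
            simp [PySem.Chars.split?]
          cases hsp : PySem.Str.split? s "-" with
          | none =>
            have h4 := PySem.Str.split?_map s "-"
            rw [hsp, hsplit] at h4; simp at h4
          | some parts =>
            have hmap : parts.map String.toList = PySem.Chars.splitOn (c :: rest) ['-'] := by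
              have h4 := PySem.Str.split?_map s "-"
              rw [hsp, hsplit] at h4; simpa using h4
            have hall : parts.all (fun part => PySem.Str.strIsalnum part)
                = (PySem.Chars.splitOn (c :: rest) ['-']).all PySem.Chars.strIsalnum := by
              rw [← hmap, List.all_map]
              simp only [PySem.Str.strIsalnum_eq, Function.comp_def]
            dsimp only
            rw [hall]
            have hgo : (PySem.Chars.splitOn (c :: rest) ['-']).all PySem.Chars.strIsalnum
                = pvPartsOK (c :: rest) [] := by
              have h5 : PySem.Chars.splitOn (c :: rest) ['-']
                  = PySem.Chars.splitOn.go ['-'] ((c :: rest).length + 1) (c :: rest) [] [] := rfl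
              rw [h5, pvGoAll _ _ _ _ (by omega)]
              simp
            rw [hgo, pvPartsOK_eq]
            simp [pvLastDash_eq, hlast, hch, Bool.beq_eq_decide_eq, he]
            exact fun _ => hc
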